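-- pv_equiv track=rewrite | github.com/jrruethe/wordlist_filter | filter.py | select_most_frequent_word
-- ===== SOURCE A (Python) =====
-- from collections import Counter
--
-- def select_most_frequent_word(cluster):
--   # Count the words
--   word_count = Counter(cluster)
--
--   # Find the word(s) with the highest count
--   max_count = max(word_count.values())
--   frequent_words = [word for word, count in word_count.items() if count == max_count]
--
--   # Check if there is more than one word with the highest count
--   if len(frequent_words) > 1:
--     return None
--   else:
--     return frequent_words[0]
-- ===== SOURCE B (Python) =====
-- from collections import Counter
--
-- def select_most_frequent_word(cluster):
--     counts = Counter(cluster).most_common()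
--     if not counts:
--         return None
--     if len(counts) > 1 and counts[0][1] == counts[1][1]:
--         return None
--     return counts[0][0]
-- ===== Notes on version B (the rewrite author's own statement) =====
-- stated objective: idiomatic
-- what changed: Replaces the max-over-values plus full filter-and-count of words at the maximum by Counter.most_common() and a single comparison of the two leading entries.
import Mathlib
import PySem

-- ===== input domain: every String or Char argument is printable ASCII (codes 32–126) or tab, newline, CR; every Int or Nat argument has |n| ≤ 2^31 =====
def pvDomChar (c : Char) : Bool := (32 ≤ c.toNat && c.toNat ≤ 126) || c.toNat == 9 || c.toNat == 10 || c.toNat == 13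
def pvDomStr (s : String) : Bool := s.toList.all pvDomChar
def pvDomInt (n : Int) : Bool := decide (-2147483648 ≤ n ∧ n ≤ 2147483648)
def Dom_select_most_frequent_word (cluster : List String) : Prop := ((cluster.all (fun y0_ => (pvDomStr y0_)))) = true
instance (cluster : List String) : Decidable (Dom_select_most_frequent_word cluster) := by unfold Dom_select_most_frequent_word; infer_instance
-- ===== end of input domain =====

-- B replaces A's max-over-values plus filter of all words at the maximum by
-- Counter.most_common() and one comparison of the two leading entries (idiomatic, not faster).

-- ===== PORT A =====
def select_most_frequent_word (cluster : List String) : Option String :=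
  let word_count := PySem.Dict.counter cluster
  match PySem.List.max? word_count.values (fun v => v) with
  | none => none  -- max([]) raises ValueError; excluded by Pre_
  | some max_count =>
    let frequent_words := (word_count.items.filter (fun p => p.2 == max_count)).map (fun p => p.1)
    if frequent_words.length > 1 then
      none
    else
      PySem.List.pyGet? frequent_words 0  -- frequent_words is nonempty under Pre_

-- ===== PORT B =====
def select_most_frequent_word_alt (cluster : List String) : Option String :=
  let counts := PySem.List.sorted (PySem.Dict.counter cluster).items (fun p => p.2) true
  match counts with
  | [] => none
  | (w, c) :: rest =>
    match rest with
    | [] => some w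
    | (_, c2) :: _ => if c == c2 then none else some w

-- ===== PRECONDITION & SPEC =====
-- Pre_ excludes only the empty cluster, on which A raises ValueError (max of an empty sequence).
def Pre_select_most_frequent_word (cluster : List String) : Prop := cluster ≠ []
instance (cluster : List String) : Decidable (Pre_select_most_frequent_word cluster) := by unfold Pre_select_most_frequent_word; infer_instance
def pvWitness_select_most_frequent_word : List String := ["a", "b", "a"]

def Spec_select_most_frequent_word (cluster : List String) (out : Option String) : Prop := out = select_most_frequent_word_alt cluster
instance (cluster : List String) (out : Option String) : Decidable (Spec_select_most_frequent_word cluster out) := by unfold Spec_select_most_frequent_word; infer_instance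

-- ===== CLAIM (what is proved, stated in full; the proofs are below) =====
def Claim_equal_select_most_frequent_word : Prop := ∀ (cluster : List String), Dom_select_most_frequent_word cluster → Pre_select_most_frequent_word cluster → Spec_select_most_frequent_word cluster (select_most_frequent_word cluster)

-- ===== LEMMAS AND PROOFS =====

-- A = B on every nonempty cluster
theorem pv_agree (cluster : List String) (hpre : cluster ≠ []) :
    select_most_frequent_word cluster = select_most_frequent_word_alt cluster := by
  unfold select_most_frequent_word select_most_frequent_word_alt
  have hvals : (PySem.Dict.counter cluster).values = (PySem.Dict.counter cluster).items.map Prod.snd := by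
    simp [PySem.Dict.values]
  have hine : (PySem.Dict.counter cluster).items ≠ [] := by
    obtain ⟨a, ha⟩ := List.exists_mem_of_ne_nil cluster hpre
    refine List.ne_nil_of_mem (a := (a, (cluster.count a : Int))) ?_
    rw [PySem.Dict.items_counter]
    exact List.mem_map_of_mem (by simp [PySem.Set.mem_ofList, ha])
  simp only [hvals]
  generalize hL : (PySem.Dict.counter cluster).items = L
  rw [hL] at hine
  have hperm : (PySem.List.sorted L (fun p => p.2) true).Perm L :=
    PySem.List.sorted_perm L (fun p => p.2) true
  have hpair : (PySem.List.sorted L (fun p => p.2) true).Pairwise (fun a b => b.2 ≤ a.2) :=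
    PySem.List.sorted_pairwise_rev L (fun p => p.2)
  cases hScases : PySem.List.sorted L (fun p => p.2) true with
  | nil =>
    exact absurd ((PySem.List.sorted_eq_nil_iff L (fun p => p.2) true).mp hScases) hine
  | cons hd rest =>
    rw [hScases] at hperm hpair
    obtain ⟨w, c⟩ := hd
    have hmax_ne : PySem.List.max? (L.map Prod.snd) (fun v => v) ≠ none := by
      rw [Ne, PySem.List.max?_eq_none_iff]
      simp [hine]
    obtain ⟨m, hm⟩ := Option.ne_none_iff_exists'.mp hmax_ne
    have hhead_ge : ∀ y ∈ L, y.2 ≤ c :=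
      PySem.List.key_head_sorted_rev_ge L (fun p => p.2) hScases
    have hmec : m = c := by
      have h1 : m ≤ c := by
        obtain ⟨p, hp, hpm⟩ := List.mem_map.mp (PySem.List.max?_mem hm)
        exact hpm ▸ hhead_ge p hp
      have hwc : ((w, c) : String × Int) ∈ L := hperm.mem_iff.mp List.mem_cons_self
      have h2 : c ≤ m := PySem.List.max?_isMax hm c (List.mem_map_of_mem hwc)
      omega
    rw [hm, hmec]
    have hfperm : (L.filter (fun p => p.2 == c)).Perm
        (((w, c) :: rest).filter (fun p => p.2 == c)) := (hperm.filter _).symm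
    cases rest with
    | nil =>
      have hLsing : L = [(w, c)] := List.perm_singleton.mp hperm.symm
      subst hLsing
      simp [PySem.List.pyGet?, PySem.List.pyIdx?]
    | cons hd2 t =>
      obtain ⟨w2, c2⟩ := hd2
      by_cases hc2 : c2 = c
      · subst hc2
        have hlen : 2 ≤ (L.filter (fun p => p.2 == c2)).length := by
          have := hfperm.length_eq
          simp at this
          omega
        simp only [List.length_map]
        rw [if_pos (by omega)]
        simp
      · have hc2lt : c2 < c := lt_of_le_of_ne (hhead_ge (w2, c2) (hperm.mem_iff.mp (by simp))) hc2
        have ht_le : ∀ y ∈ t, y.2 ≤ c2 :=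
          (List.pairwise_cons.mp (List.pairwise_cons.mp hpair).2).1
        have hfilt : (((w, c) :: (w2, c2) :: t).filter (fun p => p.2 == c)) = [(w, c)] := by
          simp only [List.filter_cons]
          rw [if_pos (by simp), if_neg (by simp; omega)]
          congr 1
          rw [List.filter_eq_nil_iff]
          intro p hp
          have := ht_le p hp
          simp
          omega
        have hLf : L.filter (fun p => p.2 == c) = [(w, c)] :=
          List.perm_singleton.mp (hfilt ▸ hfperm)
        simp [hLf, PySem.List.pyGet?, PySem.List.pyIdx?]
        omega


-- ===== VERDICT (by name: the statement is the Claim_ definition above) =====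
theorem select_most_frequent_word_spec : Claim_equal_select_most_frequent_word := by
  intro cluster _ hpre
  exact pv_agree cluster hpre
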